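-- pv_equiv track=rewrite | github.com/yanaiela/lm_meaning | memorization/explanation/default_pattern_causal_effect.py | get_default_object
-- ===== SOURCE A (Python) =====
-- from collections import defaultdict
-- from collections import OrderedDict
--
-- def get_default_object(data):
--     counts = defaultdict(dict)
--     for pattern, dic in data.items():
--         for obj, count in dic.items():
--             counts[pattern][obj] = count
--
--     most_common = {}
--     for pattern, obj_dict in counts.items():
--         desc = OrderedDict(sorted(obj_dict.items(),
--                                   key=lambda kv: kv[1], reverse=True))
--         second = None
--         if len(desc) > 1:
--             second = list(desc)[1]
--         first = list(desc)[0]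
--         most_common[pattern] = (first, second, counts[pattern][first])
--     return most_common
-- ===== SOURCE B (Python) =====
-- def get_default_object(data):
--     result = {}
--     for pattern, dic in data.items():
--         best = None
--         second = None
--         for obj, count in dic.items():
--             if best is None or count > best[1]:
--                 second = best
--                 best = (obj, count)
--             elif second is None or count > second[1]:
--                 second = (obj, count)
--         if best is not None:
--             result[pattern] = (best[0],
--                                second[0] if second is not None else None,
--                                best[1])
--     return result
-- ===== Notes on version B (the rewrite author's own statement) =====
-- stated objective: faster
-- what changed: B replaces A's per-pattern sort of all objects by count (then reading the first two) with a single linear best/second-best scan using the same stable tie-breaking, and drops the intermediate counts/OrderedDict copies.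
import Mathlib
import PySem

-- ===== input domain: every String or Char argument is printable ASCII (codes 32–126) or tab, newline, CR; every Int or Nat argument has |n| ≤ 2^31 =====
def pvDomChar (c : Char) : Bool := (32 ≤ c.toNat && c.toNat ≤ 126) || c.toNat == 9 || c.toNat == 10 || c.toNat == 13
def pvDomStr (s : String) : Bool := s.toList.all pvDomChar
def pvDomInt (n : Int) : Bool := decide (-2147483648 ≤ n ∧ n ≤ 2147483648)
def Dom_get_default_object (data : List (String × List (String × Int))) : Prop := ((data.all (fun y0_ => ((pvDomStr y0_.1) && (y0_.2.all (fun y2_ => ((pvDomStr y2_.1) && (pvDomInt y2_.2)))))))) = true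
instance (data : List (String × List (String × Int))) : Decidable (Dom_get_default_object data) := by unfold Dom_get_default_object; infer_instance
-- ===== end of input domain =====

-- B replaces A's per-pattern sort (to read off the top-two objects) by a single linear
-- best/second-best scan with the same stable tie-breaking; equivalence is about return values
-- (neither program mutates its argument).

-- ===== PORT A =====
def get_default_object (data : List (String × List (String × Int))) : List (String × String × Option String × Int) :=
  -- counts = defaultdict(dict); for pattern, dic in data.items(): for obj, count in dic.items(): counts[pattern][obj] = count
  let counts : PySem.Dict String (PySem.Dict String Int) :=
    data.foldl (fun counts pd =>
      pd.2.foldl (fun counts oc =>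
        counts.insert pd.1 ((counts.getD pd.1 PySem.Dict.empty).insert oc.1 oc.2)) counts)
      PySem.Dict.empty
  -- most_common = {}; for pattern, obj_dict in counts.items(): ...
  (counts.items.foldl (fun mc po =>
      -- desc = OrderedDict(sorted(obj_dict.items(), key=lambda kv: kv[1], reverse=True));
      -- obj_dict's keys are distinct, so the OrderedDict's pairs are exactly this sorted list
      let desc := PySem.List.sorted po.2.items (fun kv => kv.2) true
      -- second = list(desc)[1] if len(desc) > 1 else None
      let second : Option String :=
        if PySem.List.len desc > 1 then some (PySem.List.pyGetD (desc.map Prod.fst) 1 "") else none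
      -- first = list(desc)[0]  (desc is never empty: a pattern enters counts only via an assignment;
      -- the pyGetD default and the getD default below are unreachable, standing for IndexError/KeyError)
      let first := PySem.List.pyGetD (desc.map Prod.fst) 0 ""
      mc.insert po.1 (first, second, (counts.getD po.1 PySem.Dict.empty).getD first 0))
    PySem.Dict.empty).items

-- ===== PORT B =====
-- loop body of Source B: update (best, second) with the next (obj, count) pair
def pvBestTwoStep (bs : Option (String × Int) × Option (String × Int)) (oc : String × Int) :
    Option (String × Int) × Option (String × Int) :=
  match bs with
  | (none, _) => (some oc, none)
  | (some b, none) => if oc.2 > b.2 then (some oc, some b) else (some b, some oc)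
  | (some b, some s) =>
    if oc.2 > b.2 then (some oc, some b)
    else if oc.2 > s.2 then (some b, some oc)
    else (some b, some s)

def get_default_object_alt (data : List (String × List (String × Int))) : List (String × String × Option String × Int) :=
  (data.foldl (fun result pd =>
      match pd.2.foldl pvBestTwoStep (none, none) with
      | (some b, s) => result.insert pd.1 (b.1, s.map Prod.fst, b.2)
      | (none, _) => result)
    PySem.Dict.empty).items

-- ===== PRECONDITION & SPEC =====
-- Pre_ excludes association lists with duplicate pattern keys or duplicate object keys inside a
-- pattern: those do not correspond to a unique Python dict-of-dicts argument (dict construction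
-- overwrites duplicates), so neither program's value there is the one being claimed.
def Pre_get_default_object (data : List (String × List (String × Int))) : Prop :=
  (data.map Prod.fst).Nodup ∧ ∀ pd ∈ data, (pd.2.map Prod.fst).Nodup
instance (data : List (String × List (String × Int))) : Decidable (Pre_get_default_object data) := by
  unfold Pre_get_default_object; infer_instance

def pvWitness_get_default_object : (List (String × List (String × Int))) :=
  [("p", [("a", 2), ("b", 3), ("c", 3)]), ("q", [("a", 1)]), ("r", [])]

def Spec_get_default_object (data : List (String × List (String × Int))) (out : List (String × String × Option String × Int)) : Prop := out = get_default_object_alt data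
instance (data : List (String × List (String × Int))) (out : List (String × String × Option String × Int)) : Decidable (Spec_get_default_object data out) := by unfold Spec_get_default_object; infer_instance

-- ===== CLAIM (what is proved, stated in full; the proofs are below) =====
def Claim_equal_get_default_object : Prop := ∀ (data : List (String × List (String × Int))), Dom_get_default_object data → Pre_get_default_object data → Spec_get_default_object data (get_default_object data)

-- ===== LEMMAS AND PROOFS =====

-- the per-pattern result both programs compute, phrased through the sorted list
def pvTop (l : List (String × Int)) : String × Option String × Int :=
  match PySem.List.sorted l (fun kv => kv.2) true with
  | [] => ("", none, 0)
  | a :: t => (a.1, t[0]?.map Prod.fst, a.2)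

-- obj_dict built by A's inner loop from a duplicate-free list has exactly that pair list
def pvInner (l : List (String × Int)) : PySem.Dict String Int :=
  l.foldl (fun d oc => d.insert oc.1 oc.2) PySem.Dict.empty

theorem pvInner_items (l : List (String × Int)) (h : (l.map Prod.fst).Nodup) :
    (pvInner l).items = l := by
  have := PySem.Dict.items_foldl_insert_fresh l Prod.fst Prod.snd PySem.Dict.empty
    (fun a _ => PySem.Dict.contains_empty _) h
  simpa [pvInner] using this

-- ----- B side: one scan step mirrors one stable descending insertion -----
theorem pvStep_insertBy (s : List (String × Int)) (x : String × Int) :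
    pvBestTwoStep (s[0]?, s[1]?) x =
      ((PySem.List.insertBy (fun a b : String × Int => decide (b.2 < a.2)) x s)[0]?,
       (PySem.List.insertBy (fun a b : String × Int => decide (b.2 < a.2)) x s)[1]?) := by
  match s with
  | [] => rfl
  | [a] =>
    by_cases h : a.2 < x.2 <;>
      simp [pvBestTwoStep, PySem.List.insertBy, h, gt_iff_lt]
  | a :: b :: u =>
    by_cases h1 : a.2 < x.2
    · simp [pvBestTwoStep, PySem.List.insertBy, h1, gt_iff_lt]
    · by_cases h2 : b.2 < x.2 <;>
        simp [pvBestTwoStep, PySem.List.insertBy, h1, h2, gt_iff_lt]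

theorem pvScan_sorted_aux (l s : List (String × Int)) :
    l.foldl pvBestTwoStep (s[0]?, s[1]?) =
      ((l.foldl (fun acc x => PySem.List.insertBy (fun a b : String × Int => decide (b.2 < a.2)) x acc) s)[0]?,
       (l.foldl (fun acc x => PySem.List.insertBy (fun a b : String × Int => decide (b.2 < a.2)) x acc) s)[1]?) := by
  induction l generalizing s with
  | nil => rfl
  | cons x t ih =>
    rw [List.foldl_cons, List.foldl_cons, pvStep_insertBy]
    exact ih _

-- the linear scan returns exactly the first two elements of Python's stable descending sort
theorem pvBestTwo_sorted (l : List (String × Int)) :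
    l.foldl pvBestTwoStep (none, none) =
      ((PySem.List.sorted l (fun kv => kv.2) true)[0]?,
       (PySem.List.sorted l (fun kv => kv.2) true)[1]?) := by
  rw [PySem.List.sorted_rev_eq_foldl_insertBy]
  exact pvScan_sorted_aux l []

-- ----- A side, phase 1: the counts dict is the non-empty entries with their pair dicts -----
theorem pvCounts_inner (l : List (String × Int)) (c : PySem.Dict String (PySem.Dict String Int))
    (p : String) (d : PySem.Dict String Int) :
    l.foldl (fun c oc => c.insert p ((c.getD p PySem.Dict.empty).insert oc.1 oc.2)) (c.insert p d)
      = c.insert p (l.foldl (fun d oc => d.insert oc.1 oc.2) d) := by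
  induction l generalizing d with
  | nil => rfl
  | cons x t ih =>
    rw [List.foldl_cons, PySem.Dict.getD_insert_self, PySem.Dict.insert_insert_self,
      List.foldl_cons]
    exact ih _

theorem pvCounts_items (data : List (String × List (String × Int)))
    (c : PySem.Dict String (PySem.Dict String Int))
    (hnd : (data.map Prod.fst).Nodup) (hfresh : ∀ pd ∈ data, c.contains pd.1 = false) :
    (data.foldl (fun counts pd =>
        pd.2.foldl (fun counts oc =>
          counts.insert pd.1 ((counts.getD pd.1 PySem.Dict.empty).insert oc.1 oc.2)) counts) c).items
      = c.items ++ (data.filter (fun pd => !pd.2.isEmpty)).map (fun pd => (pd.1, pvInner pd.2)) := by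
  induction data generalizing c with
  | nil => simp
  | cons pd rest ih =>
    obtain ⟨p, l⟩ := pd
    rw [List.foldl_cons]
    match l with
    | [] =>
      simp only [List.foldl_nil, List.filter_cons, List.isEmpty_nil]
      exact ih c (List.nodup_cons.mp hnd).2 (fun qd hq => hfresh qd (List.mem_cons_of_mem _ hq))
    | x :: t =>
      have hp : c.contains p = false := hfresh (p, x :: t) (List.mem_cons_self ..)
      rw [List.foldl_cons, PySem.Dict.getD_of_not_contains c _ hp, pvCounts_inner]
      rw [ih (c.insert p (t.foldl (fun d oc => d.insert oc.1 oc.2) (PySem.Dict.empty.insert x.1 x.2)))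
        (List.nodup_cons.mp hnd).2 ?_]
      · rw [PySem.Dict.items_insert_of_not_contains c _ hp]
        simp [pvInner, List.append_assoc]
      · intro qd hq
        rw [PySem.Dict.contains_insert]
        have hne : qd.1 ≠ p := by
          intro h
          have hm : qd.1 ∈ rest.map Prod.fst := List.mem_map_of_mem hq
          exact (List.nodup_cons.mp hnd).1 (h ▸ hm)
        simp [hne, hfresh qd (List.mem_cons_of_mem _ hq)]

-- ----- B side: the result dict is the non-empty entries with their top-two triples -----
theorem pvAlt_items (data : List (String × List (String × Int)))
    (r : PySem.Dict String (String × Option String × Int))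
    (hnd : (data.map Prod.fst).Nodup) (hfresh : ∀ pd ∈ data, r.contains pd.1 = false) :
    (data.foldl (fun result pd =>
        match pd.2.foldl pvBestTwoStep (none, none) with
        | (some b, s) => result.insert pd.1 (b.1, s.map Prod.fst, b.2)
        | (none, _) => result) r).items
      = r.items ++ (data.filter (fun pd => !pd.2.isEmpty)).map (fun pd => (pd.1, pvTop pd.2)) := by
  induction data generalizing r with
  | nil => simp
  | cons pd rest ih =>
    obtain ⟨p, l⟩ := pd
    rw [List.foldl_cons]
    match l with
    | [] =>
      simp only [List.filter_cons, List.isEmpty_nil]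
      exact ih r (List.nodup_cons.mp hnd).2 (fun qd hq => hfresh qd (List.mem_cons_of_mem _ hq))
    | x :: t =>
      have hp : r.contains p = false := hfresh (p, x :: t) (List.mem_cons_self ..)
      rw [pvBestTwo_sorted]
      have hne : PySem.List.sorted (x :: t) (fun kv : String × Int => kv.2) true ≠ [] := by
        simp [PySem.List.sorted_eq_nil_iff]
      obtain ⟨a, t', hs⟩ := List.exists_cons_of_ne_nil hne
      rw [hs]
      simp only [List.getElem?_cons_zero, List.getElem?_cons_succ]
      rw [ih (r.insert p (a.1, t'[0]?.map Prod.fst, a.2))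
        (List.nodup_cons.mp hnd).2 ?_]
      · rw [PySem.Dict.items_insert_of_not_contains r _ hp]
        have : pvTop (x :: t) = (a.1, t'[0]?.map Prod.fst, a.2) := by
          simp [pvTop, hs]
        simp [this, List.append_assoc]
      · intro qd hq
        rw [PySem.Dict.contains_insert]
        have hne' : qd.1 ≠ p := by
          intro h
          have hm : qd.1 ∈ rest.map Prod.fst := List.mem_map_of_mem hq
          exact (List.nodup_cons.mp hnd).1 (h ▸ hm)
        simp [hne', hfresh qd (List.mem_cons_of_mem _ hq)]

-- A's per-pattern triple, read off the sorted list, is pvTop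
theorem pvA_entry (l : List (String × Int)) (hl : l ≠ []) (hnd : (l.map Prod.fst).Nodup) :
    (PySem.List.pyGetD ((PySem.List.sorted l (fun kv => kv.2) true).map Prod.fst) 0 "",
     (if PySem.List.len (PySem.List.sorted l (fun kv => kv.2) true) > 1
      then some (PySem.List.pyGetD ((PySem.List.sorted l (fun kv => kv.2) true).map Prod.fst) 1 "")
      else none),
     (pvInner l).getD (PySem.List.pyGetD ((PySem.List.sorted l (fun kv => kv.2) true).map Prod.fst) 0 "") 0)
      = pvTop l := by
  have hne : PySem.List.sorted l (fun kv : String × Int => kv.2) true ≠ [] := by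
    simp [PySem.List.sorted_eq_nil_iff, hl]
  obtain ⟨a, t', hs⟩ := List.exists_cons_of_ne_nil hne
  have ha : a ∈ l := by
    have : a ∈ PySem.List.sorted l (fun kv : String × Int => kv.2) true := by
      rw [hs]; exact List.mem_cons_self ..
    exact (PySem.List.mem_sorted ..).mp this
  have hkeys : (pvInner l).keys.Nodup := by
    simp only [PySem.Dict.keys, pvInner_items l hnd]
    exact hnd
  have hcount : (pvInner l).getD a.1 0 = a.2 := by
    refine PySem.Dict.getD_of_mem_items _ ?_ hkeys 0
    rw [pvInner_items l hnd]
    simpa using ha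
  rw [hs]
  match t' with
  | [] => simp [pvTop, hs, pysem, PySem.List.len, hcount]
  | b :: u => simp [pvTop, hs, pysem, PySem.List.len, hcount]

-- shorthand for A's first-phase fold (only to state facts about it in the final proof)
def pvCountsOf (data : List (String × List (String × Int))) : PySem.Dict String (PySem.Dict String Int) :=
  data.foldl (fun counts pd =>
    pd.2.foldl (fun counts oc =>
      counts.insert pd.1 ((counts.getD pd.1 PySem.Dict.empty).insert oc.1 oc.2)) counts)
    PySem.Dict.empty

-- ===== VERDICT (by name: the statement is the Claim_ definition above) =====
theorem get_default_object_spec : Claim_equal_get_default_object := by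
  intro data _ hpre
  obtain ⟨hout, hin⟩ := hpre
  have hfsub : ((data.filter (fun pd => !pd.2.isEmpty)).map Prod.fst).Nodup :=
    (List.filter_sublist.map Prod.fst).nodup hout
  have hitems : (pvCountsOf data).items
      = (data.filter (fun pd => !pd.2.isEmpty)).map (fun pd => (pd.1, pvInner pd.2)) := by
    simpa using pvCounts_items data PySem.Dict.empty hout (fun pd _ => PySem.Dict.contains_empty _)
  have hckeys : (pvCountsOf data).keys.Nodup := by
    simp only [PySem.Dict.keys, hitems, List.map_map]
    exact hfsub
  unfold Spec_get_default_object
  show get_default_object data = _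
  simp only [get_default_object, get_default_object_alt]
  rw [pvAlt_items data PySem.Dict.empty hout (fun pd _ => PySem.Dict.contains_empty _)]
  have hc : (List.foldl
      (fun counts pd =>
        List.foldl (fun counts oc => counts.insert pd.1 ((counts.getD pd.1 PySem.Dict.empty).insert oc.1 oc.2))
          counts pd.2)
      PySem.Dict.empty data) = pvCountsOf data := rfl
  rw [hc, hitems]
  rw [PySem.Dict.items_foldl_insert_fresh _ Prod.fst _ PySem.Dict.empty
    (fun a _ => PySem.Dict.contains_empty _)
    (by simpa [List.map_map, Function.comp_def] using hfsub)]
  simp only [List.map_map]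
  congr 1
  refine List.map_congr_left (fun pd hpd => ?_)
  have hmem : pd ∈ data := List.mem_of_mem_filter hpd
  have hnil : pd.2 ≠ [] := by
    have := (List.mem_filter.mp hpd).2
    simpa [List.isEmpty_iff] using this
  have hgetD : (pvCountsOf data).getD pd.1 PySem.Dict.empty = pvInner pd.2 := by
    refine PySem.Dict.getD_of_mem_items _ ?_ hckeys _
    rw [hitems]
    exact List.mem_map_of_mem hpd
  simp only [Function.comp_apply, hgetD, pvInner_items pd.2 (hin pd hmem)]
  exact congrArg _ (pvA_entry pd.2 hnil (hin pd hmem))
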